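-- pv_equiv track=rewrite | github.com/Arachne0/get_ploting | Human_experts/later/figure5.py | calculate_distances_from_fixed_center
-- ===== SOURCE A (Python) =====
-- def calculate_distance(pos1, pos2):
--     """Calculate the Chebyshev distance (max of x or y difference)."""
--     x1, y1 = pos1
--     x2, y2 = pos2
--     return max(abs(x1 - x2), abs(y1 - y2))
--
-- def index_to_coordinates(index, cols=4):
--     """Convert 1D index to 2D coordinates."""
--     x = index // cols
--     y = index % cols
--     return (x, y)
--
-- def calculate_distances_from_fixed_center(actions, is_black=True):
--     """Calculate distances of stones from the fixed center (17 or 18)."""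
--     # Determine odd or even indices based on the stone color (black or white)
--     if is_black:
--         # Get only odd-indexed actions (black stones)
--         own_actions = [actions[i] for i in range(len(actions)) if i % 2 == 1]
--     else:
--         # Get only even-indexed actions (white stones)
--         own_actions = [actions[i] for i in range(len(actions)) if i % 2 == 0]
--
--     # Fixed central coordinates (17 or 18)
--     center1 = index_to_coordinates(17)  # (4, 1)
--     center2 = index_to_coordinates(18)  # (4, 2)
--
--     # Convert actions to coordinates
--     coordinates = [index_to_coordinates(action) for action in own_actions]
--
--     # Calculate distances from the fixed center (17 or 18)
--     distances = [min(calculate_distance(coord, center1), calculate_distance(coord, center2)) for coord in coordinates]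
--     return distances
-- ===== SOURCE B (Python) =====
-- def calculate_distances_from_fixed_center(actions, is_black=True):
--     """One pass over the relevant indices with a closed-form distance:
--     min of the two Chebyshev distances to (4,1) and (4,2) collapses to
--     max(|x-4|, 0, 1-y, y-2)."""
--     start = 1 if is_black else 0
--     distances = []
--     for i in range(start, len(actions), 2):
--         x, y = divmod(actions[i], 4)
--         distances.append(max(abs(x - 4), 0, 1 - y, y - 2))
--     return distances
-- ===== Notes on version B (the rewrite author's own statement) =====
-- stated objective: simpler
-- what changed: B iterates once over range(start, len, 2) and appends a closed-form distance max(|x-4|, 0, 1-y, y-2) per stone, instead of building an odd/even index filter list, a coordinate list and a min-of-two-Chebyshev-distances list.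
import Mathlib
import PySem

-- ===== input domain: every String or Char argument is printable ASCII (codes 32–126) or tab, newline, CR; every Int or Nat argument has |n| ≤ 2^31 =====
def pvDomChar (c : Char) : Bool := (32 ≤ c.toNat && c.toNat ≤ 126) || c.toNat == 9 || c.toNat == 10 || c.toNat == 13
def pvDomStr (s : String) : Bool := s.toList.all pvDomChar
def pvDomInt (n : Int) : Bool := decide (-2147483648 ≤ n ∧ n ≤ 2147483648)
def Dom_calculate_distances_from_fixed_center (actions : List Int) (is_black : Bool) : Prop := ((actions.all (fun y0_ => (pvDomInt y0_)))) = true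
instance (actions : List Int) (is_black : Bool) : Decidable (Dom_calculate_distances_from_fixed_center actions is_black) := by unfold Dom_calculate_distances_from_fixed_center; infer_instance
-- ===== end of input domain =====

-- B replaces A's three intermediate lists (odd/even-indexed actions, coordinates, min of two
-- Chebyshev distances) with one pass over range(start, len, 2) appending a closed-form distance.

-- ===== PORT A =====
def calculate_distance (pos1 pos2 : Int × Int) : Int :=
  max |pos1.1 - pos2.1| |pos1.2 - pos2.2|

def index_to_coordinates (index : Int) : Int × Int :=
  (PySem.Int.floordiv index 4, PySem.Int.mod index 4)

def calculate_distances_from_fixed_center (actions : List Int) (is_black : Bool) : List Int :=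
  -- the comprehension indices i come from range(len(actions)), so actions[i] never raises:
  -- pyGetD is exact here
  let own_actions : List Int :=
    if is_black then
      ((List.range actions.length).filter (fun i => i % 2 == 1)).map
        (fun i => PySem.List.pyGetD actions (Int.ofNat i) 0)
    else
      ((List.range actions.length).filter (fun i => i % 2 == 0)).map
        (fun i => PySem.List.pyGetD actions (Int.ofNat i) 0)
  let center1 := index_to_coordinates 17
  let center2 := index_to_coordinates 18
  let coordinates := own_actions.map index_to_coordinates
  coordinates.map (fun coord => min (calculate_distance coord center1) (calculate_distance coord center2))

-- ===== PORT B =====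
def calculate_distances_from_fixed_center_alt (actions : List Int) (is_black : Bool) : List Int :=
  let start : Int := if is_black then 1 else 0
  -- indices from range(start, len(actions), 2) are always in range: pyGetD is exact
  (PySem.List.pyRange start (actions.length : Int) 2).map (fun i =>
    let a := PySem.List.pyGetD actions i 0
    let x := PySem.Int.floordiv a 4
    let y := PySem.Int.mod a 4
    max |x - 4| (max 0 (max (1 - y) (y - 2))))

-- ===== PRECONDITION & SPEC =====
def Spec_calculate_distances_from_fixed_center (actions : List Int) (is_black : Bool) (out : List Int) : Prop := out = calculate_distances_from_fixed_center_alt actions is_black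
instance (actions : List Int) (is_black : Bool) (out : List Int) : Decidable (Spec_calculate_distances_from_fixed_center actions is_black out) := by unfold Spec_calculate_distances_from_fixed_center; infer_instance

-- ===== CLAIM (what is proved, stated in full; the proofs are below) =====
def Claim_equal_calculate_distances_from_fixed_center : Prop := ∀ (actions : List Int) (is_black : Bool), Dom_calculate_distances_from_fixed_center actions is_black → Spec_calculate_distances_from_fixed_center actions is_black (calculate_distances_from_fixed_center actions is_black)

-- ===== LEMMAS AND PROOFS =====

-- step-2 range grows on the right exactly when n has the parity of s
lemma pyRange_two_succ (s : Int) (n : Nat) (hs : s = 0 ∨ s = 1) :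
    PySem.List.pyRange s ((n : Int) + 1) 2 =
      PySem.List.pyRange s (n : Int) 2 ++ (if (n : Int) % 2 = s then [(n : Int)] else []) := by
  rw [PySem.List.pyRange_of_pos _ _ (by norm_num : (0:Int) < 2),
      PySem.List.pyRange_of_pos _ _ (by norm_num : (0:Int) < 2)]
  by_cases hpar : (n : Int) % 2 = s
  · rw [if_pos hpar]
    split_ifs with ha hb
    · have hT : ((n : Int) + 1 - s + 2 - 1) / 2 = ((n : Int) - s + 2 - 1) / 2 + 1 := by omega
      rw [hT, show (((n : Int) - s + 2 - 1) / 2 + 1).toNat = (((n : Int) - s + 2 - 1) / 2).toNat + 1 by omega,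
          List.range_succ, List.map_append]
      congr 1
      simp only [List.map_cons, List.map_nil, List.cons.injEq, and_true]
      omega
    · have hn : (n : Int) = s := by rcases hs with h | h <;> omega
      rw [show (((n : Int) + 1 - s + 2 - 1) / 2).toNat = 1 by omega]
      simp [hn]
    · exfalso; rcases hs with h | h <;> omega
    · exfalso; rcases hs with h | h <;> omega
  · rw [if_neg hpar, List.append_nil]
    split_ifs with ha hb <;>
      first
        | rfl
        | (congr 2; omega)

-- odd indices of range n, cast to Int, are range(1, n, 2)
lemma odd_index (n : Nat) :
    List.map (fun i => Int.ofNat i) ((List.range n).filter (fun i => i % 2 == 1)) =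
      PySem.List.pyRange 1 (n : Int) 2 := by
  induction n with
  | zero => decide
  | succ m ih =>
    rw [List.range_succ, List.filter_append, List.map_append,
        show ((m + 1 : Nat) : Int) = (m : Int) + 1 by push_cast; ring,
        pyRange_two_succ 1 m (Or.inr rfl), ih]
    congr 1
    by_cases h : m % 2 = 1
    · rw [if_pos (by omega)]
      simp [List.filter, h]
    · rw [if_neg (by omega)]
      have hb : (m % 2 == 1) = false := by simpa using h
      simp [List.filter, hb]

-- even indices of range n, cast to Int, are range(0, n, 2)
lemma even_index (n : Nat) :
    List.map (fun i => Int.ofNat i) ((List.range n).filter (fun i => i % 2 == 0)) =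
      PySem.List.pyRange 0 (n : Int) 2 := by
  induction n with
  | zero => decide
  | succ m ih =>
    rw [List.range_succ, List.filter_append, List.map_append,
        show ((m + 1 : Nat) : Int) = (m : Int) + 1 by push_cast; ring,
        pyRange_two_succ 0 m (Or.inl rfl), ih]
    congr 1
    by_cases h : m % 2 = 0
    · rw [if_pos (by omega)]
      simp [List.filter, h]
    · rw [if_neg (by omega)]
      have hb : (m % 2 == 0) = false := by simpa using h
      simp [List.filter, hb]

-- the algebraic collapse: min of the two Chebyshev distances to (4,1) and (4,2)
lemma dist_collapse (x y : Int) :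
    min (max |x - 4| |y - 1|) (max |x - 4| |y - 2|) =
      max |x - 4| (max 0 (max (1 - y) (y - 2))) := by
  rcases abs_cases (x - 4) with ⟨h1, _⟩ | ⟨h1, _⟩ <;>
    rcases abs_cases (y - 1) with ⟨h2, _⟩ | ⟨h2, _⟩ <;>
      rcases abs_cases (y - 2) with ⟨h3, _⟩ | ⟨h3, _⟩ <;>
        rw [h1, h2, h3] <;> omega

-- per element: A's min-of-two-distances equals B's closed form
lemma elem_eq (a : Int) :
    min (calculate_distance (index_to_coordinates a) (index_to_coordinates 17))
        (calculate_distance (index_to_coordinates a) (index_to_coordinates 18)) =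
      max |PySem.Int.floordiv a 4 - 4|
        (max 0 (max (1 - PySem.Int.mod a 4) (PySem.Int.mod a 4 - 2))) := by
  have h17 : index_to_coordinates 17 = (4, 1) := by decide
  have h18 : index_to_coordinates 18 = (4, 2) := by decide
  rw [h17, h18]
  simp only [index_to_coordinates, calculate_distance]
  exact dist_collapse _ _

-- ===== VERDICT (by name: the statement is the Claim_ definition above) =====
theorem calculate_distances_from_fixed_center_spec : Claim_equal_calculate_distances_from_fixed_center := by
  intro actions is_black _
  unfold Spec_calculate_distances_from_fixed_center
  unfold calculate_distances_from_fixed_center calculate_distances_from_fixed_center_alt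
  cases is_black <;>
    simp only [Bool.false_eq_true, if_true, if_false] <;>
    [rw [← even_index actions.length]; rw [← odd_index actions.length]] <;>
  · simp only [List.map_map]
    refine List.map_congr_left ?_
    intro i _
    simp only [Function.comp]
    exact elem_eq _
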